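-- pv_equiv track=rewrite | github.com/umitkablan/sudokist.py | logic.py | _get_columns_same_set_in_size_n
-- ===== SOURCE A (Python) =====
-- def _get_columns_same_set_in_size_n(set_lst, n_size):
--     selecteds = []
--     for i in range(0, len(set_lst) - n_size + 1):
--         if len(set_lst[i]) != n_size:
--             continue
--         selecteds.append(set_lst[i])
--         for j in range(i + 1, len(set_lst)):
--             if selecteds[0] == set_lst[j]:
--                 selecteds.append(set_lst[j])
--                 if len(selecteds) == n_size:
--                     return selecteds[0]
--         selecteds = []
--     return None
-- ===== SOURCE B (Python) =====
-- def _get_columns_same_set_in_size_n(set_lst, n_size):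
--     # A qualifying column-set must be seen n_size times (i.e. at least twice),
--     # so for n_size < 2 there is nothing to find.
--     if n_size < 2:
--         return None
--     counts = {}          # key -> total number of occurrences; insertion order = first-occurrence order
--     for col in set_lst:
--         if len(col) == n_size:
--             key = tuple(col)
--             counts[key] = counts.get(key, 0) + 1
--     for key, cnt in counts.items():
--         if cnt >= n_size:
--             return list(key)
--     return None
-- ===== Notes on version B (the rewrite author's own statement) =====
-- stated objective: alternative
-- what changed: Replaced A's nested scans (for each candidate index, re-scan the whole tail counting equal columns) by one counting pass with a dict keyed by the column tuple (insertion order = first-occurrence order) followed by one scan of the dict for the first key with count >= n_size; this removes A's worst-case quadratic rescan, though on typical inputs A's early exit makes the two comparable.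
import Mathlib
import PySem

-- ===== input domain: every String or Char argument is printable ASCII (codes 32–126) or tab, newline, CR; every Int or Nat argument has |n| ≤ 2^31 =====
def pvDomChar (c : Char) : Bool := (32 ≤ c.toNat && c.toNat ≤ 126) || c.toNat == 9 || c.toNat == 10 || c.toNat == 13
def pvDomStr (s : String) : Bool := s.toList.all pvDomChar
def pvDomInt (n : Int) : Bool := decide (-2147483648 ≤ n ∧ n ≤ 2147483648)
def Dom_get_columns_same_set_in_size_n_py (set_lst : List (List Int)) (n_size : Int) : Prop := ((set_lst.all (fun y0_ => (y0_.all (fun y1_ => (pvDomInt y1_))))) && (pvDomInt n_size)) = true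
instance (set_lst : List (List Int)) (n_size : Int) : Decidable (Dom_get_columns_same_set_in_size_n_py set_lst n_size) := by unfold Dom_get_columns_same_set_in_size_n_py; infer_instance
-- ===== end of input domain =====

-- B replaces A's nested tail-rescans by one counting pass with a dict (first-occurrence
-- order) plus one scan of the dict's counts: an alternative single-pass algorithm.

-- ===== PORT A =====
-- inner loop 'for j in range(i+1, len(set_lst))'; both pyGetD indices are provably in
-- range on every reachable call (sel is nonempty, 0 ≤ j < len(set_lst)), so the default [] is never used
def pyA_inner (set_lst : List (List Int)) (n_size : Int) (sel : List (List Int)) : List Int → Option (List Int)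
  | [] => none
  | j :: js =>
    if PySem.List.pyGetD sel 0 [] = PySem.List.pyGetD set_lst j [] then
      let sel' := sel ++ [PySem.List.pyGetD set_lst j []]
      if (sel'.length : Int) = n_size then some (PySem.List.pyGetD sel' 0 [])
      else pyA_inner set_lst n_size sel' js
    else pyA_inner set_lst n_size sel js

-- outer loop 'for i in range(0, len(set_lst) - n_size + 1)'; 'selecteds = []' after the
-- inner loop is captured by restarting each iteration with the fresh singleton [set_lst[i]]
def pyA_outer (set_lst : List (List Int)) (n_size : Int) : List Int → Option (List Int)
  | [] => none
  | i :: is =>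
    if ¬ ((PySem.List.pyGetD set_lst i []).length : Int) = n_size then pyA_outer set_lst n_size is
    else
      match pyA_inner set_lst n_size [PySem.List.pyGetD set_lst i []]
              (PySem.List.pyRange (i + 1) (set_lst.length : Int) 1) with
      | some r => some r
      | none => pyA_outer set_lst n_size is

def get_columns_same_set_in_size_n_py (set_lst : List (List Int)) (n_size : Int) : Option (List Int) :=
  pyA_outer set_lst n_size (PySem.List.pyRange 0 ((set_lst.length : Int) - n_size + 1) 1)

-- ===== PORT B =====
-- counting pass: counts[key] = counts.get(key, 0) + 1 for every column of length n_size
def pyB_count (n_size : Int) : List (List Int) → PySem.Dict (List Int) Int → PySem.Dict (List Int) Int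
  | [], d => d
  | col :: rest, d =>
    if (col.length : Int) = n_size then pyB_count n_size rest (d.insert col (d.getD col 0 + 1))
    else pyB_count n_size rest d

-- scan of counts.items(): first key whose count reaches n_size
def pyB_find (n_size : Int) : List (List Int × Int) → Option (List Int)
  | [] => none
  | (k, c) :: rest => if n_size ≤ c then some k else pyB_find n_size rest

def get_columns_same_set_in_size_n_py_alt (set_lst : List (List Int)) (n_size : Int) : Option (List Int) :=
  if n_size < 2 then none
  else pyB_find n_size (pyB_count n_size set_lst PySem.Dict.empty).items

-- ===== PRECONDITION & SPEC =====
-- Pre_ excludes exactly the inputs where A raises: for n_size ≤ 0 the outer loop never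
-- returns and reaches i = len(set_lst), so set_lst[i] raises IndexError.
def Pre_get_columns_same_set_in_size_n_py (set_lst : List (List Int)) (n_size : Int) : Prop := 1 ≤ n_size
instance (set_lst : List (List Int)) (n_size : Int) : Decidable (Pre_get_columns_same_set_in_size_n_py set_lst n_size) := by unfold Pre_get_columns_same_set_in_size_n_py; infer_instance

def pvWitness_get_columns_same_set_in_size_n_py : List (List Int) × Int := ([[1, 2], [3], [1, 2]], 2)


def Spec_get_columns_same_set_in_size_n_py (set_lst : List (List Int)) (n_size : Int) (out : Option (List Int)) : Prop := out = get_columns_same_set_in_size_n_py_alt set_lst n_size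
instance (set_lst : List (List Int)) (n_size : Int) (out : Option (List Int)) : Decidable (Spec_get_columns_same_set_in_size_n_py set_lst n_size out) := by unfold Spec_get_columns_same_set_in_size_n_py; infer_instance

-- ===== CLAIM (what is proved, stated in full; the proofs are below) =====
def Claim_equal_get_columns_same_set_in_size_n_py : Prop := ∀ (set_lst : List (List Int)) (n_size : Int), Dom_get_columns_same_set_in_size_n_py set_lst n_size → Pre_get_columns_same_set_in_size_n_py set_lst n_size → Spec_get_columns_same_set_in_size_n_py set_lst n_size (get_columns_same_set_in_size_n_py set_lst n_size)

-- ===== LEMMAS AND PROOFS =====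

-- common characterisation of A's scan: first element c with len(c) = n and at least n
-- occurrences of c from its position on (reachable only when 1 < n)
def specGo (n : Int) : List (List Int) → Option (List Int)
  | [] => none
  | c :: rest =>
    if (c.length : Int) = n ∧ 1 < n ∧ n ≤ 1 + (rest.count c : Int) then some c
    else specGo n rest

lemma find?_congr_mem {α : Type} (p q : α → Bool) :
    ∀ (l : List α), (∀ x ∈ l, p x = q x) → l.find? p = l.find? q := by
  intro l
  induction l with
  | nil => intro _; rfl
  | cons c rest ih =>
    intro h
    simp only [List.find?_cons]
    rw [h c (by simp)]
    cases hq : q c with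
    | true => rfl
    | false => exact ih (fun x hx => h x (by simp [hx]))

lemma find?_foldl_add {α : Type} [BEq α] [LawfulBEq α] (p : α → Bool) :
    ∀ (l s : List α),
    List.find? p (List.foldl PySem.Set.add s l) =
      (match List.find? p s with
       | some v => some v
       | none => List.find? p l) := by
  intro l
  induction l with
  | nil => intro s; cases h : List.find? p s <;> simp [h]
  | cons x xs ih =>
    intro s
    simp only [List.foldl_cons]
    rw [ih]
    unfold PySem.Set.add
    by_cases hc : PySem.Set.contains s x = true
    · rw [if_pos hc]
      have hmem : x ∈ s := by simpa [PySem.Set.contains] using hc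
      cases hs : List.find? p s with
      | some v => rfl
      | none =>
        have hx : p x = false := by
          have := List.find?_eq_none.mp hs
          exact Bool.eq_false_iff.mpr (fun hpx => this x hmem hpx)
        simp [hx]
    · rw [if_neg hc]
      rw [List.find?_append]
      cases hs : List.find? p s with
      | some v => rfl
      | none =>
        simp only [Option.none_or]
        cases hx : p x with
        | true => simp [hx, List.find?]
        | false => simp [hx, List.find?]

lemma find?_ofList {α : Type} [BEq α] [LawfulBEq α] (p : α → Bool) (l : List α) :
    List.find? p (PySem.Set.ofList l) = List.find? p l := by
  unfold PySem.Set.ofList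
  rw [find?_foldl_add]
  simp [PySem.Set.empty]

lemma specGo_none_of_short (n : Int) : ∀ (l : List (List Int)), (l.length : Int) < n → specGo n l = none := by
  intro l
  induction l with
  | nil => intro _; rfl
  | cons c rest ih =>
    intro h
    have hc : (rest.count c : Int) ≤ (rest.length : Int) := by
      exact_mod_cast List.count_le_length
    simp only [List.length_cons] at h
    unfold specGo
    rw [if_neg (by push_cast at h ⊢; omega)]
    exact ih (by push_cast at h ⊢; omega)

lemma specGo_none_of_le_one (n : Int) (hn : ¬ 1 < n) : ∀ (l : List (List Int)), specGo n l = none := by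
  intro l
  induction l with
  | nil => rfl
  | cons c rest ih =>
    unfold specGo
    rw [if_neg (by tauto)]
    exact ih

lemma count_cons_ne (x c : List Int) (rest : List (List Int)) (h : x ≠ c) :
    List.count x (c :: rest) = List.count x rest := by
  simp [Ne.symm h]

lemma specGo_eq_find (n : Int) (hn : 1 < n) :
    ∀ (l : List (List Int)),
    specGo n l = l.find? (fun c => decide ((c.length : Int) = n) && decide (n ≤ (l.count c : Int))) := by
  intro l
  induction l with
  | nil => rfl
  | cons c rest ih =>
    unfold specGo
    simp only [List.find?_cons]
    by_cases h1 : (c.length : Int) = n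
    · by_cases h2 : n ≤ 1 + (rest.count c : Int)
      · rw [if_pos ⟨h1, hn, h2⟩]
        have ht : (decide ((c.length : Int) = n) && decide (n ≤ (((c :: rest).count c : Nat) : Int))) = true := by
          simp only [List.count_cons_self, Bool.and_eq_true, decide_eq_true_eq]
          exact ⟨h1, by push_cast; omega⟩
        rw [ht]
      · rw [if_neg (by tauto)]
        have hc : (decide ((c.length : Int) = n) && decide (n ≤ (((c :: rest).count c : Nat) : Int))) = false := by
          simp only [List.count_cons_self, Bool.and_eq_false_iff, decide_eq_false_iff_not]
          right; push_cast; omega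
        rw [hc, ih]
        apply find?_congr_mem
        intro x hx
        by_cases hl : (x.length : Int) = n
        · by_cases hxc : x = c
          · subst hxc
            have e1 : decide (n ≤ ((rest.count x : Nat) : Int)) = false := by
              simp only [decide_eq_false_iff_not]; omega
            have e2 : decide (n ≤ ((List.count x (x :: rest) : Nat) : Int)) = false := by
              rw [List.count_cons_self]; simp only [decide_eq_false_iff_not]; push_cast; omega
            rw [e1, e2]
          · rw [count_cons_ne x c rest hxc]
        · simp [hl]
    · rw [if_neg (by tauto)]
      have hc : (decide ((c.length : Int) = n) && decide (n ≤ (((c :: rest).count c : Nat) : Int))) = false := by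
        simp [h1]
      rw [hc, ih]
      apply find?_congr_mem
      intro x hx
      by_cases hl : (x.length : Int) = n
      · have hxc : x ≠ c := fun he => h1 (he ▸ hl)
        rw [count_cons_ne x c rest hxc]
      · simp [hl]

lemma pyA_inner_eq (lst : List (List Int)) (n : Int) :
    ∀ (k : Nat) (a : Int), 0 ≤ a → ((lst.length : Int) - a).toNat = k →
    ∀ (t : List (List Int)) (v : List Int),
    pyA_inner lst n (v :: t) (PySem.List.pyRange a (lst.length : Int) 1) =
      (if ((t.length : Int) + 1 < n ∧ n ≤ (t.length : Int) + 1 + (((lst.drop a.toNat).count v : Nat) : Int))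
       then some v else none) := by
  intro k
  induction k with
  | zero =>
    intro a ha hk t v
    rw [PySem.List.pyRange_one_eq_nil (by omega)]
    rw [List.drop_eq_nil_of_le (by omega)]
    unfold pyA_inner
    rw [if_neg (by simp only [List.count_nil]; push_cast; omega)]
  | succ k ih =>
    intro a ha hk t v
    have hlt : a < (lst.length : Int) := by omega
    have hb : a.toNat < lst.length := by omega
    have hdrop : lst.drop a.toNat = lst[a.toNat] :: lst.drop (a.toNat + 1) := List.drop_eq_getElem_cons hb
    have hget : PySem.List.pyGetD lst a [] = lst[a.toNat] :=
      PySem.List.pyGetD_eq_getElem lst [] ha hlt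
    have hsel : PySem.List.pyGetD (v :: t) 0 [] = v := by
      simp [PySem.List.pyGetD, PySem.List.pyGet?, PySem.List.pyIdx?]
    have hsucc : (a + 1).toNat = a.toNat + 1 := by omega
    rw [PySem.List.pyRange_one_cons hlt]
    unfold pyA_inner
    simp only [hget, hsel, List.cons_append, List.length_cons, List.length_append,
      List.length_cons, List.length_nil]
    by_cases hv : v = lst[a.toNat]
    · rw [if_pos hv]
      have hcount : ((lst.drop a.toNat).count v : Int) = 1 + ((lst.drop (a.toNat + 1)).count v : Int) := by
        rw [hdrop, ← hv, List.count_cons_self]; push_cast; omega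
      by_cases hn2 : ((t.length + 1 + 1 : Nat) : Int) = n
      · rw [if_pos (by push_cast at hn2 ⊢; omega)]
        rw [if_pos (by push_cast at hn2; constructor <;> omega)]
        simp only [PySem.List.pyGetD, PySem.List.pyGet?, PySem.List.pyIdx?, List.length_cons]
        rw [if_pos (le_refl (0:Int)), if_pos (by push_cast; omega)]
        simp
      · rw [if_neg (by push_cast at hn2 ⊢; omega)]
        rw [ih (a + 1) (by omega) (by omega) (t ++ [lst[a.toNat]]) v]
        rw [hsucc]
        push_cast at hn2
        by_cases hc : ((t.length : Int) + 1 < n ∧ n ≤ (t.length : Int) + 1 + ((lst.drop a.toNat).count v : Int))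
        · rw [if_pos (by simp only [List.length_append, List.length_cons, List.length_nil]; push_cast; omega),
            if_pos hc]
        · rw [if_neg (by simp only [List.length_append, List.length_cons, List.length_nil]; push_cast; omega),
            if_neg hc]
    · rw [if_neg hv]
      rw [ih (a + 1) (by omega) (by omega) t v, hsucc]
      have hcount : (lst.drop a.toNat).count v = (lst.drop (a.toNat + 1)).count v := by
        rw [hdrop, List.count_cons]
        simp [Ne.symm hv]
      rw [hcount]

lemma pyA_outer_eq (lst : List (List Int)) (n : Int) (hn : 1 ≤ n) :
    ∀ (k : Nat) (i : Int), 0 ≤ i → (((lst.length : Int) - n + 1) - i).toNat = k →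
    pyA_outer lst n (PySem.List.pyRange i ((lst.length : Int) - n + 1) 1) = specGo n (lst.drop i.toNat) := by
  intro k
  induction k with
  | zero =>
    intro i hi hk
    rw [PySem.List.pyRange_one_eq_nil (by omega)]
    have hlen : ((lst.drop i.toNat).length : Int) < n := by
      simp only [List.length_drop]
      omega
    rw [specGo_none_of_short n _ hlen]
    rfl
  | succ k ih =>
    intro i hi hk
    have hlt : i < (lst.length : Int) - n + 1 := by omega
    have hb : i.toNat < lst.length := by omega
    have hdrop : lst.drop i.toNat = lst[i.toNat] :: lst.drop (i.toNat + 1) := List.drop_eq_getElem_cons hb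
    have hget : PySem.List.pyGetD lst i [] = lst[i.toNat] :=
      PySem.List.pyGetD_eq_getElem lst [] hi (by omega)
    have hsucc : (i + 1).toNat = i.toNat + 1 := by omega
    rw [PySem.List.pyRange_one_cons hlt]
    unfold pyA_outer
    simp only [hget]
    rw [hdrop]
    unfold specGo
    by_cases h1 : ((lst[i.toNat] : List Int).length : Int) = n
    · rw [if_neg (by simpa using h1)]
      rw [pyA_inner_eq lst n (((lst.length : Int) - (i + 1)).toNat) (i + 1) (by omega) rfl [] lst[i.toNat]]
      rw [hsucc]
      simp only [List.length_nil, Nat.cast_zero, zero_add]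
      by_cases hC : 1 < n ∧ n ≤ 1 + ((List.count lst[i.toNat] (lst.drop (i.toNat + 1)) : Nat) : Int)
      · rw [if_pos hC, if_pos ⟨h1, hC.1, hC.2⟩]
      · rw [if_neg hC, if_neg (by tauto)]
        rw [ih (i + 1) (by omega) (by omega), hsucc]
    · rw [if_pos (by simpa using h1)]
      rw [if_neg (by tauto)]
      rw [ih (i + 1) (by omega) (by omega), hsucc]

lemma pyA_eq_specGo (lst : List (List Int)) (n : Int) (hn : 1 ≤ n) :
    get_columns_same_set_in_size_n_py lst n = specGo n lst := by
  unfold get_columns_same_set_in_size_n_py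
  rw [pyA_outer_eq lst n hn ((((lst.length : Int) - n + 1) - 0).toNat) 0 (by omega) rfl]
  simp

lemma pyB_count_eq (n : Int) :
    ∀ (l : List (List Int)) (d : PySem.Dict (List Int) Int),
    pyB_count n l d =
      (l.filter (fun c => decide ((c.length : Int) = n))).foldl (fun d x => d.insert x (d.getD x 0 + 1)) d := by
  intro l
  induction l with
  | nil => intro d; rfl
  | cons c rest ih =>
    intro d
    unfold pyB_count
    by_cases h : (c.length : Int) = n
    · rw [if_pos h, List.filter_cons_of_pos (by simpa using h), List.foldl_cons, ih]
    · rw [if_neg h, List.filter_cons_of_neg (by simpa using h), ih]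

lemma pyB_find_map (n : Int) (g : List Int → Int) :
    ∀ (ks : List (List Int)),
    pyB_find n (ks.map (fun k => (k, g k))) = ks.find? (fun k => decide (n ≤ g k)) := by
  intro ks
  induction ks with
  | nil => rfl
  | cons k rest ih =>
    simp only [List.map_cons, List.find?_cons]
    unfold pyB_find
    by_cases h : n ≤ g k
    · rw [if_pos h]; simp [h]
    · rw [if_neg h]; simp only [h, decide_false]; exact ih

lemma pyB_alt_eq_find (lst : List (List Int)) (n : Int) (hn : 1 < n) :
    get_columns_same_set_in_size_n_py_alt lst n =
      lst.find? (fun c => decide ((c.length : Int) = n) && decide (n ≤ (lst.count c : Int))) := by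
  unfold get_columns_same_set_in_size_n_py_alt
  rw [if_neg (by omega)]
  rw [pyB_count_eq n lst PySem.Dict.empty]
  rw [PySem.Dict.foldl_insert_getD_add_one_eq_counter]
  rw [PySem.Dict.items_counter]
  rw [pyB_find_map n (fun k => ((List.count k (lst.filter (fun c => decide ((c.length : Int) = n))) : Nat) : Int))]
  rw [find?_ofList]
  rw [List.find?_filter]
  apply find?_congr_mem
  intro x hx
  by_cases hl : (x.length : Int) = n
  · have hcf : List.count x (lst.filter (fun c => decide ((c.length : Int) = n))) = List.count x lst :=
      List.count_filter (by simpa using hl)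
    simp [hl, hcf]
  · simp [hl]


-- ===== VERDICT (by name: the statement is the Claim_ definition above) =====
theorem get_columns_same_set_in_size_n_py_spec : Claim_equal_get_columns_same_set_in_size_n_py := by
  intro lst n _ hpre
  unfold Pre_get_columns_same_set_in_size_n_py at hpre
  unfold Spec_get_columns_same_set_in_size_n_py
  by_cases h2 : 1 < n
  · rw [pyA_eq_specGo lst n (by omega), specGo_eq_find n h2 lst, pyB_alt_eq_find lst n h2]
  · rw [pyA_eq_specGo lst n hpre, specGo_none_of_le_one n h2 lst]
    unfold get_columns_same_set_in_size_n_py_alt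
    rw [if_pos (by omega)]
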